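-- pv_equiv track=rewrite | github.com/Seb010/Python-Password-Checker | password.py | check_if_there_are_consecutive_numbers
-- ===== SOURCE A (Python) =====
-- def find_number_in_string(input):
--     result = False
--     for i in input:
--         if i.isdigit():
--             result = True
--     return result
--
-- def get_first_digit(input):
--     for i in input:
--         if i.isdigit():
--             return i
--
-- def get_first_digit_index(input):
--     index = 0
--     for i in input:
--         if i.isdigit():
--             return index
--         index = index + 1
--
-- def check_if_there_are_consecutive_numbers(input):
--     if not find_number_in_string(input):
--         return False
--     counter = 1
--     total_index = 0
--     last_char = get_first_digit(input)
--     last_char_index = get_first_digit_index(input)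
--
--     for i in input:
--         if counter == 3:
--             return True
--         if i.isdigit():
--             if int(i) - int(last_char) == 1 and total_index - last_char_index == 1:
--                 counter = counter + 1
--             last_char = i
--             last_char_index = total_index
--         else:
--             counter = 1
--         total_index = total_index + 1
--     if counter == 3:
--         return True
--     return False
-- ===== SOURCE B (Python) =====
-- def check_if_there_are_consecutive_numbers(input):
--     # Split the input into maximal runs of digits, then check each run
--     # for at least two adjacent pairs that step up by exactly 1.
--     runs = []
--     current = []
--     for ch in input:
--         if ch.isdigit():
--             current.append(int(ch))
--         else:
--             if current:
--                 runs.append(current)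
--                 current = []
--     if current:
--         runs.append(current)
--     return any(sum(1 for a, b in zip(run, run[1:]) if b - a == 1) >= 2 for run in runs)
-- ===== Notes on version B (the rewrite author's own statement) =====
-- stated objective: simpler
-- what changed: A's three helper pre-scans (digit existence, first digit, its index) plus a counter/last-index state machine are replaced by a two-phase decomposition: split the string into maximal digit runs, then count adjacent +1 pairs per run and test any run for >= 2.
import Mathlib
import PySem

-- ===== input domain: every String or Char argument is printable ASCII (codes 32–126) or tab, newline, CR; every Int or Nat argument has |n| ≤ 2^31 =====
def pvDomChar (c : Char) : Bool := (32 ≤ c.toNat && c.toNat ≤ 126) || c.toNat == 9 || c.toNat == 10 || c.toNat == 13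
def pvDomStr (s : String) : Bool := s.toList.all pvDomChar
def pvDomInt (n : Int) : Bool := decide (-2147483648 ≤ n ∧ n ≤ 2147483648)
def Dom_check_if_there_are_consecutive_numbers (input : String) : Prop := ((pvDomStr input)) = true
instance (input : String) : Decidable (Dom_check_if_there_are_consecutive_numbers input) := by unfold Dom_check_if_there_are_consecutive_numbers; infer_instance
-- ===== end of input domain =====

-- B replaces A's three pre-scan helpers and counter/index bookkeeping by a two-phase
-- decomposition: split the input into maximal digit runs, then count adjacent +1 pairs
-- per run (objective: simpler; same O(n) cost).

-- ===== PORT A =====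
-- int(c) for a single digit char; exact on ASCII digits (only reached under isdigit on the printable-ASCII domain)
def pvDigVal (c : Char) : Int := (c.toNat : Int) - 48

def find_number_in_string (input : String) : Bool :=
  input.toList.foldl (fun result i => if PySem.Chars.isdigit i then true else result) false

def get_first_digit : List Char → Option Char
  | [] => none
  | i :: rest => if PySem.Chars.isdigit i then some i else get_first_digit rest

def get_first_digit_index_aux : List Char → Int → Option Int
  | [], _ => none
  | i :: rest, index =>
    if PySem.Chars.isdigit i then some index else get_first_digit_index_aux rest (index + 1)

def get_first_digit_index (input : String) : Option Int :=
  get_first_digit_index_aux input.toList 0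


def caLoop : List Char → Int → Int → Char → Int → Bool
  | [], counter, _, _, _ => counter == 3
  | i :: rest, counter, total_index, last_char, last_char_index =>
    if counter == 3 then true
    else if PySem.Chars.isdigit i then
      caLoop rest
        (if pvDigVal i - pvDigVal last_char == 1 && total_index - last_char_index == 1 then
           counter + 1 else counter)
        (total_index + 1) i total_index
    else caLoop rest 1 (total_index + 1) last_char last_char_index

def check_if_there_are_consecutive_numbers (input : String) : Bool :=
  if !find_number_in_string input then false
  else
    match get_first_digit input.toList, get_first_digit_index input with
    | some last_char, some last_char_index =>
        caLoop input.toList 1 0 last_char last_char_index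
    | _, _ => false  -- unreachable: a digit exists, so both helpers return some

-- ===== PORT B =====
-- sum(1 for a, b in zip(run, run[1:]) if b - a == 1), as structural recursion on the run
def pairInc : List Int → Nat
  | a :: b :: rest => (if b - a == 1 then 1 else 0) + pairInc (b :: rest)
  | _ => 0

-- the for-loop building the list of maximal digit runs (returns runs and the open run)
def cbFold : List Char → List (List Int) → List Int → List (List Int) × List Int
  | [], runs, current => (runs, current)
  | ch :: rest, runs, current =>
    if PySem.Chars.isdigit ch then cbFold rest runs (current ++ [pvDigVal ch])
    else cbFold rest (if current.isEmpty then runs else runs ++ [current]) []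

def check_if_there_are_consecutive_numbers_alt (input : String) : Bool :=
  let (runs, current) := cbFold input.toList [] []
  let runs := if current.isEmpty then runs else runs ++ [current]
  runs.any (fun run => 2 ≤ pairInc run)

-- ===== PRECONDITION & SPEC =====
def Spec_check_if_there_are_consecutive_numbers (input : String) (out : Bool) : Prop := out = check_if_there_are_consecutive_numbers_alt input
instance (input : String) (out : Bool) : Decidable (Spec_check_if_there_are_consecutive_numbers input out) := by unfold Spec_check_if_there_are_consecutive_numbers; infer_instance

-- ===== CLAIM (what is proved, stated in full; the proofs are below) =====
def Claim_equal_check_if_there_are_consecutive_numbers : Prop := ∀ (input : String), Dom_check_if_there_are_consecutive_numbers input → Spec_check_if_there_are_consecutive_numbers input (check_if_there_are_consecutive_numbers input)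

-- ===== LEMMAS AND PROOFS =====

-- common semantics both sides are reduced to: scan with the previous digit (if the
-- preceding char was a digit) and the +1-pair count of the current digit run
def goS : List Char → Option Int → Nat → Bool
  | [], _, k => decide (2 ≤ k)
  | c :: rest, prev, k =>
    if 2 ≤ k then true
    else if PySem.Chars.isdigit c then
      goS rest (some (pvDigVal c)) (if prev == some (pvDigVal c - 1) then k + 1 else k)
    else goS rest none 0

def pvP (run : List Int) : Bool := 2 ≤ pairInc run

def pvFinalize (p : List (List Int) × List Int) : Bool :=
  (if p.2.isEmpty then p.1 else p.1 ++ [p.2]).any pvP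

-- ---- B side ----

lemma pairInc_snoc (cur : List Int) (d : Int) :
    pairInc (cur ++ [d]) = pairInc cur + (if cur.getLast? == some (d - 1) then 1 else 0) := by
  induction cur with
  | nil => simp [pairInc]
  | cons a cur ih =>
    cases cur with
    | nil =>
      have h1 : pairInc ([a] ++ [d]) = (if d - a == 1 then 1 else 0) := by simp [pairInc]
      have h2 : pairInc [a] = 0 := by simp [pairInc]
      rw [h1, h2, List.getLast?_singleton]
      by_cases h : d - a = 1
      · have ha : a = d - 1 := by omega
        simp [h, ha]
      · have ha : ¬ a = d - 1 := by omega
        simp [h, ha]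
    | cons b cur =>
      have h1 : pairInc ((a :: b :: cur) ++ [d]) =
          (if b - a == 1 then 1 else 0) + pairInc ((b :: cur) ++ [d]) := by
        simp [pairInc]
      have h2 : pairInc (a :: b :: cur) =
          (if b - a == 1 then 1 else 0) + pairInc (b :: cur) := by
        simp [pairInc]
      have h3 : (a :: b :: cur).getLast? = (b :: cur).getLast? := by
        simp
      rw [h1, ih, h2, h3]
      omega

lemma pairInc_le_snoc (cur : List Int) (d : Int) : pairInc cur ≤ pairInc (cur ++ [d]) := by
  rw [pairInc_snoc]; omega

lemma finalize_of_any (cs : List Char) (runs : List (List Int)) (cur : List Int)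
    (h : runs.any pvP = true) : pvFinalize (cbFold cs runs cur) = true := by
  induction cs generalizing runs cur with
  | nil =>
    simp only [cbFold, pvFinalize]
    split <;> simp_all [List.any_append]
  | cons c rest ih =>
    simp only [cbFold]
    split
    · exact ih runs (cur ++ [pvDigVal c]) h
    · apply ih
      split
      · exact h
      · simp [List.any_append, h]

lemma finalize_of_cur (cs : List Char) (runs : List (List Int)) (cur : List Int)
    (h : 2 ≤ pairInc cur) : pvFinalize (cbFold cs runs cur) = true := by
  induction cs generalizing runs cur with
  | nil =>
    have hne : cur.isEmpty = false := by
      cases cur with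
      | nil => simp [pairInc] at h
      | cons a t => simp
    simp [cbFold, pvFinalize, hne, List.any_append, pvP, h]
  | cons c rest ih =>
    simp only [cbFold]
    split
    · exact ih runs (cur ++ [pvDigVal c]) (le_trans h (pairInc_le_snoc cur (pvDigVal c)))
    · have hne : cur.isEmpty = false := by
        cases cur with
        | nil => simp [pairInc] at h
        | cons a t => simp
      apply finalize_of_any
      simp [hne, List.any_append, pvP, h]

lemma cbFold_eq_goS (cs : List Char) (runs : List (List Int)) (cur : List Int) :
    pvFinalize (cbFold cs runs cur) =
      (runs.any pvP || goS cs cur.getLast? (pairInc cur)) := by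
  induction cs generalizing runs cur with
  | nil =>
    cases h : cur.isEmpty with
    | true =>
      have : cur = [] := by cases cur <;> simp_all
      subst this
      simp [cbFold, pvFinalize, goS, pairInc]
    | false =>
      simp [cbFold, pvFinalize, h, List.any_append, goS, pvP]
  | cons c rest ih =>
    simp only [cbFold, goS]
    by_cases hk : 2 ≤ pairInc cur
    · simp only [if_pos hk]
      split
      · rw [finalize_of_cur rest runs _ (le_trans hk (pairInc_le_snoc cur (pvDigVal c)))]
        simp
      · have hne : cur.isEmpty = false := by
          cases cur with
          | nil => simp [pairInc] at hk
          | cons a t => simp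
        rw [hne]
        simp only [Bool.false_eq_true, if_false]
        rw [finalize_of_any rest (runs ++ [cur]) []
          (by simp [List.any_append, pvP, hk])]
        simp
    · simp only [if_neg hk]
      split
      · rw [ih runs (cur ++ [pvDigVal c])]
        rw [pairInc_snoc]
        have hlast : (cur ++ [pvDigVal c]).getLast? = some (pvDigVal c) := by simp
        rw [hlast]
        split <;> simp
      · cases h : cur.isEmpty with
        | true =>
          have hcur : cur = [] := by cases cur <;> simp_all
          subst hcur
          simp only [if_true]
          rw [ih runs []]
          simp [pairInc]
        | false =>
          simp only [Bool.false_eq_true, if_false]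
          rw [ih (runs ++ [cur]) []]
          have hcurP : pvP cur = false := by simp [pvP, hk]
          simp [List.any_append, hcurP, pairInc]

lemma alt_eq_goS (input : String) :
    check_if_there_are_consecutive_numbers_alt input = goS input.toList none 0 := by
  unfold check_if_there_are_consecutive_numbers_alt
  have h := cbFold_eq_goS input.toList [] []
  cases hcb : cbFold input.toList [] [] with
  | mk runs cur =>
    rw [hcb] at h
    simp only [pvFinalize] at h
    simpa [pairInc] using h

-- ---- A side ----

lemma caLoop_eq_goS (rest : List Char) (k : Nat) (t lc_i : Int) (lc : Char)
    (hk : k ≤ 2) (hlt : lc_i < t) (hdig : t - lc_i = 1 → PySem.Chars.isdigit lc = true) :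
    caLoop rest ((k : Int) + 1) t lc lc_i =
      goS rest (if t - lc_i = 1 then some (pvDigVal lc) else none) k := by
  induction rest generalizing k t lc lc_i with
  | nil =>
    simp only [caLoop, goS]
    by_cases h : k = 2
    · subst h; simp
    · have h1 : ¬ ((k : Int) + 1 = 3) := by omega
      have h2 : ¬ (2 ≤ k) := by omega
      simp [h1, h2]
  | cons c rest ih =>
    simp only [caLoop, goS]
    by_cases h3 : k = 2
    · have : ((k : Int) + 1 == 3) = true := by simp [h3]
      rw [this]
      have : (2 ≤ k) := by omega
      simp [this]
    · have hne : ((k : Int) + 1 == 3) = false := by simp; omega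
      have hne2 : ¬ (2 ≤ k) := by omega
      rw [hne, if_neg hne2]
      simp only [Bool.false_eq_true, if_false]
      by_cases hd : PySem.Chars.isdigit c = true
      · rw [if_pos hd, if_pos hd]
        have hcond : (pvDigVal c - pvDigVal lc == 1 && t - lc_i == 1) =
            ((if t - lc_i = 1 then some (pvDigVal lc) else none) == some (pvDigVal c - 1)) := by
          by_cases ht : t - lc_i = 1
          · simp only [if_pos ht]
            by_cases hv : pvDigVal c - pvDigVal lc = 1
            · have : pvDigVal lc = pvDigVal c - 1 := by omega
              simp [hv, ht, this]
            · have h5 : (pvDigVal c - pvDigVal lc == 1) = false := by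
                simpa using hv
              have h6 : (pvDigVal lc == pvDigVal c - 1) = false := by
                simp; omega
              simp [h5, h6]
          · simp [ht]
        rw [hcond]
        by_cases hcnd :
            ((if t - lc_i = 1 then some (pvDigVal lc) else none) == some (pvDigVal c - 1)) = true
        · rw [if_pos hcnd, if_pos hcnd]
          have hk' : k + 1 ≤ 2 := by omega
          have hrec := ih (k + 1) (t + 1) t c hk' (by omega) (fun _ => hd)
          rw [show ((k : Int) + 1 + 1) = (((k + 1 : Nat) : Int) + 1) by push_cast; ring, hrec]
          simp [show t + 1 - t = (1 : Int) by ring]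
        · rw [if_neg hcnd, if_neg hcnd]
          have hrec := ih k (t + 1) t c hk (by omega) (fun _ => hd)
          rw [hrec]
          simp [show t + 1 - t = (1 : Int) by ring]
      · rw [if_neg hd, if_neg hd]
        have hrec := ih 0 (t + 1) lc_i lc (by omega) (by omega) (by omega)
        simp only [Nat.cast_zero, zero_add] at hrec ⊢
        rw [hrec]
        have hne3 : ¬ (t + 1 - lc_i = 1) := by omega
        simp [hne3]

-- skipping the leading non-digit prefix, on both sides
lemma caLoop_skip (pre suf : List Char) (t : Int) (lc : Char) (lc_i : Int)
    (h : ∀ c ∈ pre, PySem.Chars.isdigit c = false) :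
    caLoop (pre ++ suf) 1 t lc lc_i = caLoop suf 1 (t + pre.length) lc lc_i := by
  induction pre generalizing t with
  | nil => simp
  | cons c pre ih =>
    have hc : PySem.Chars.isdigit c = false := h c (by simp)
    simp only [List.cons_append, caLoop, hc]
    norm_num
    rw [ih (t + 1) (fun c hc => h c (by simp [hc]))]
    congr 1
    push_cast
    ring

lemma goS_skip (pre suf : List Char)
    (h : ∀ c ∈ pre, PySem.Chars.isdigit c = false) :
    goS (pre ++ suf) none 0 = goS suf none 0 := by
  induction pre with
  | nil => simp
  | cons c pre ih =>
    have hc : PySem.Chars.isdigit c = false := h c (by simp)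
    simp only [List.cons_append, goS, hc]
    norm_num
    exact ih (fun c hc => h c (by simp [hc]))

lemma findNum_foldl (cs : List Char) (b : Bool) :
    cs.foldl (fun result i => if PySem.Chars.isdigit i then true else result) b =
      (b || cs.any PySem.Chars.isdigit) := by
  induction cs generalizing b with
  | nil => simp
  | cons c cs ih =>
    simp only [List.foldl, List.any_cons]
    rw [ih]
    by_cases h : PySem.Chars.isdigit c = true <;> simp [h]

-- decomposition of the input at its first digit, with all three helpers characterised
lemma first_digit_split (cs : List Char) :
    (cs.any PySem.Chars.isdigit = false ∧ ∀ c ∈ cs, PySem.Chars.isdigit c = false) ∨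
    (∃ pre lc suf, cs = pre ++ lc :: suf ∧ (∀ c ∈ pre, PySem.Chars.isdigit c = false) ∧
      PySem.Chars.isdigit lc = true ∧ get_first_digit cs = some lc ∧
      (∀ t : Int, get_first_digit_index_aux cs t = some (t + pre.length))) := by
  induction cs with
  | nil => left; simp
  | cons c cs ih =>
    by_cases hc : PySem.Chars.isdigit c = true
    · right
      exact ⟨[], c, cs, by simp, by simp, hc,
        by simp [get_first_digit, hc], fun t => by simp [get_first_digit_index_aux, hc]⟩
    · rcases ih with ⟨h1, h2⟩ | ⟨pre, lc, suf, heq, hpre, hlc, hgfd, hgfdi⟩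
      · left
        constructor
        · simp [hc, h1]
        · intro x hx
          rcases List.mem_cons.mp hx with rfl | hx
          · simpa using hc
          · exact h2 x hx
      · right
        refine ⟨c :: pre, lc, suf, by simp [heq], ?_, hlc, ?_, ?_⟩
        · intro x hx
          rcases List.mem_cons.mp hx with rfl | hx
          · simpa using hc
          · exact hpre x hx
        · simp [get_first_digit, hc, hgfd]
        · intro t
          simp only [get_first_digit_index_aux, hc]
          norm_num
          rw [hgfdi (t + 1)]
          congr 1
          push_cast
          ring

lemma goS_none_all_nondigit (cs : List Char)
    (h : ∀ c ∈ cs, PySem.Chars.isdigit c = false) : goS cs none 0 = false := by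
  induction cs with
  | nil => simp [goS]
  | cons c cs ih =>
    have hc : PySem.Chars.isdigit c = false := h c (by simp)
    simp only [goS, hc]
    norm_num
    exact ih (fun x hx => h x (by simp [hx]))

lemma A_eq_goS (cs : List Char) :
    (if !(cs.foldl (fun result i => if PySem.Chars.isdigit i then true else result) false) then
       false
     else
       match get_first_digit cs, get_first_digit_index_aux cs 0 with
       | some lc, some li => caLoop cs 1 0 lc li
       | _, _ => false) = goS cs none 0 := by
  rcases first_digit_split cs with ⟨h1, h2⟩ | ⟨pre, lc, suf, heq, hpre, hlc, hgfd, hgfdi⟩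
  · rw [findNum_foldl, h1]
    simp only [Bool.false_or, Bool.not_false, if_true]
    exact (goS_none_all_nondigit cs h2).symm
  · have hany : cs.any PySem.Chars.isdigit = true := by
      rw [heq]; simp [List.any_append, hlc]
    rw [findNum_foldl, hany]
    simp only [Bool.false_or, Bool.not_true, Bool.false_eq_true, if_false]
    rw [hgfd, hgfdi 0]
    simp only [zero_add]
    rw [heq]
    rw [caLoop_skip pre (lc :: suf) 0 lc (pre.length : Int) hpre]
    rw [goS_skip pre (lc :: suf) hpre]
    simp only [zero_add]
    -- step through the first digit on both sides
    have hself : (pvDigVal lc - pvDigVal lc == 1) = false := by simp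
    simp only [caLoop, goS, hlc, hself]
    norm_num
    have := caLoop_eq_goS suf 0 ((pre.length : Int) + 1) (pre.length : Int) lc
      (by omega) (by omega) (fun _ => hlc)
    simp only [Nat.cast_zero, zero_add] at this
    rw [this]
    simp [show (pre.length : Int) + 1 - pre.length = 1 by ring]

lemma Afun_eq_goS (input : String) :
    check_if_there_are_consecutive_numbers input = goS input.toList none 0 := by
  unfold check_if_there_are_consecutive_numbers find_number_in_string get_first_digit_index
  exact A_eq_goS input.toList

-- ===== VERDICT (by name: the statement is the Claim_ definition above) =====
theorem check_if_there_are_consecutive_numbers_spec : Claim_equal_check_if_there_are_consecutive_numbers := by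
  intro input _
  unfold Spec_check_if_there_are_consecutive_numbers
  rw [alt_eq_goS input, Afun_eq_goS input]
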